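-- pv_equiv track=rewrite | github.com/violet-luo/leetcode | 5_hash_map/Amazon OA. Unique File Names.py | unique_files
-- ===== SOURCE A (Python) =====
-- def unique_files(filenames):
--     dic = {}
--     res = []
--
--     for file in filenames:
--         if file in dic:
--             dic[file] += 1
--             res.append(file + str(dic[file]))
--         else:
--             dic[file] = 0
--             res.append(file)
--     return res
-- ===== SOURCE B (Python) =====
-- def unique_files(filenames):
--     # two staged passes: group the positions of each name, then scatter suffixed names into a preallocated result
--     groups = {}
--     for i, f in enumerate(filenames):
--         groups.setdefault(f, []).append(i)
--     res = [""] * len(filenames)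
--     for name, positions in groups.items():
--         for k, pos in enumerate(positions):
--             res[pos] = name if k == 0 else name + str(k)
--     return res
-- ===== Notes on version B (the rewrite author's own statement) =====
-- stated objective: alternative
-- what changed: Replaces A's single pass with a threaded counter dict by a two-stage index-then-fill scheme: first build a dict from each name to the ordered list of positions where it occurs, then preallocate the result and scatter name (rank 0) or name+str(k) (rank k) into those positions.
import Mathlib
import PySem

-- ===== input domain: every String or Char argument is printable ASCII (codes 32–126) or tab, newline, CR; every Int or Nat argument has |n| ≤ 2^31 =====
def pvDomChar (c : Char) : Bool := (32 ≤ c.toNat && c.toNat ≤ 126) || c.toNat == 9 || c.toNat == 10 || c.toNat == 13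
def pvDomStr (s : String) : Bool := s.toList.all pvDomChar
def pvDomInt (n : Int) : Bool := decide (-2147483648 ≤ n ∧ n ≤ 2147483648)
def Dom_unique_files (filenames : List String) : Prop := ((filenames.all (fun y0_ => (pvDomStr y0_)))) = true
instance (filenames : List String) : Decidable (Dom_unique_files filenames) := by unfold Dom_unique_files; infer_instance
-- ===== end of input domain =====

-- B replaces A's counter-threading single pass by a two-stage scheme: group positions by
-- name, then scatter the suffixed names into a preallocated result (objective: alternative).

-- ===== PORT A =====
-- A: one pass with a dict counting prior occurrences; res gets name or name+str(counter).
def unique_files (filenames : List String) : List String :=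
  (filenames.foldl
    (fun (st : PySem.Dict String Int × List String) file =>
      let dic := st.1
      let res := st.2
      if dic.contains file then
        let dic' := dic.insert file (dic.getD file 0 + 1)
        (dic', res ++ [file ++ PySem.Int.toStr (dic'.getD file 0)])
      else
        (dic.insert file 0, res ++ [file]))
    (PySem.Dict.empty, [])).2

-- ===== PORT B =====
-- B pass 1: groups[f] = ordered list of positions of f (setdefault(f,[]).append(i) ≡ modify f [] (· ++ [i])).
-- B pass 2: res = [""]*n, then for each group scatter name (rank 0) / name+str(k) into res[pos].
def unique_files_alt (filenames : List String) : List String :=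
  let groups : PySem.Dict String (List Int) :=
    (PySem.List.enumerate filenames 0).foldl
      (fun d p => d.modify p.2 [] (· ++ [p.1])) PySem.Dict.empty
  let res0 : List String := List.replicate filenames.length ""
  groups.items.foldl
    (fun res pr =>
      (PySem.List.enumerate pr.2 0).foldl
        (fun res q =>
          PySem.List.pySetD res q.2 (if q.1 == 0 then pr.1 else pr.1 ++ PySem.Int.toStr q.1))
        res)
    res0

-- ===== PRECONDITION & SPEC =====
def Spec_unique_files (filenames : List String) (out : List String) : Prop := out = unique_files_alt filenames
instance (filenames : List String) (out : List String) : Decidable (Spec_unique_files filenames out) := by unfold Spec_unique_files; infer_instance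

-- ===== CLAIM (what is proved, stated in full; the proofs are below) =====
def Claim_equal_unique_files : Prop := ∀ (filenames : List String), Dom_unique_files filenames → Spec_unique_files filenames (unique_files filenames)

-- ===== LEMMAS AND PROOFS =====

-- the value both programs produce at absolute position j of fs
def pvVal (fs : List String) (j : Nat) : String :=
  let f := fs.getD j ""
  let c := (fs.take j).count f
  if c = 0 then f else f ++ PySem.Int.toStr (c : Int)

-- positions (absolute, starting at s) of name f in t
def pvPos (t : List String) (s : Nat) (f : String) : List Nat :=
  match t with
  | [] => []
  | x :: r => (if x = f then [s] else []) ++ pvPos r (s + 1) f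

-- suffixed name for occurrence rank c
def pvOut (f : String) (c : Nat) : String :=
  if c = 0 then f else f ++ PySem.Int.toStr (c : Int)

-- ---------- A side: A = pointwise pvVal ----------

def stepA (st : PySem.Dict String Int × List String) (file : String) :
    PySem.Dict String Int × List String :=
  let dic := st.1
  let res := st.2
  if dic.contains file then
    let dic' := dic.insert file (dic.getD file 0 + 1)
    (dic', res ++ [file ++ PySem.Int.toStr (dic'.getD file 0)])
  else
    (dic.insert file 0, res ++ [file])

lemma unique_files_eq_stepA (fs : List String) :
    unique_files fs = (fs.foldl stepA (PySem.Dict.empty, [])).2 := rfl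

lemma stepA_pos (dic : PySem.Dict String Int) (res : List String) (f : String)
    (h : dic.contains f = true) :
    stepA (dic, res) f =
      (dic.insert f (dic.getD f 0 + 1), res ++ [f ++ PySem.Int.toStr (dic.getD f 0 + 1)]) := by
  simp [stepA, h, PySem.Dict.getD_insert_self]

lemma stepA_neg (dic : PySem.Dict String Int) (res : List String) (f : String)
    (h : dic.contains f = false) :
    stepA (dic, res) f = (dic.insert f 0, res ++ [f]) := by
  simp [stepA, h]

def specGo (fs : List String) : Nat → List String → List String
  | _, [] => []
  | i, f :: t =>
      (if (fs.take i).count f = 0 then f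
       else f ++ PySem.Int.toStr ((fs.take i).count f : Int)) :: specGo fs (i + 1) t

lemma specGo_eq_map (fs : List String) : ∀ (rest : List String) (i : Nat),
    fs.drop i = rest →
    specGo fs i rest = (List.range rest.length).map (fun m => pvVal fs (i + m)) := by
  intro rest
  induction rest with
  | nil => intro i _; simp [specGo]
  | cons f t ih =>
      intro i hdrop
      have h0 : fs[i]? = some f := by
        have : (fs.drop i)[0]? = fs[i + 0]? := List.getElem?_drop
        rw [hdrop] at this
        simpa using this.symm
      have hget : fs.getD i "" = f := by simp [List.getD_eq_getElem?_getD, h0]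
      have hdrop' : fs.drop (i + 1) = t := by
        have : (fs.drop i).drop 1 = fs.drop (i + 1) := by
          rw [List.drop_drop]
        rw [← this, hdrop]; rfl
      rw [List.length_cons, List.range_succ_eq_map]
      simp only [specGo, List.map_cons, List.map_map, ih (i+1) hdrop']
      congr 1
      · simp [pvVal, h0]
      · apply List.map_congr_left
        intro m _
        simp only [Function.comp]
        congr 1
        omega

lemma loopA (rest : List String) : ∀ (pre res : List String) (dic : PySem.Dict String Int)
    (fs : List String), fs = pre ++ rest →
    (∀ f, dic.contains f = (pre.count f != 0)) →
    (∀ f, pre.count f ≠ 0 → dic.getD f 0 = (pre.count f : Int) - 1) →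
    (rest.foldl stepA (dic, res)).2 = res ++ specGo fs pre.length rest := by
  induction rest with
  | nil => intro pre res dic fs hfs hc hg; simp [specGo]
  | cons f t ih =>
      intro pre res dic fs hfs hc hg
      have htake : fs.take pre.length = pre := by rw [hfs]; exact List.take_left
      have hcnt : ∀ g, (pre ++ [f]).count g = pre.count g + if f = g then 1 else 0 := by
        intro g; simp [List.count_append, List.count_singleton, beq_iff_eq]
      have hfs' : fs = (pre ++ [f]) ++ t := by simp [hfs]
      have hlen : (pre ++ [f]).length = pre.length + 1 := by simp
      have hcontains : ∀ (v : Int) g,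
          (dic.insert f v).contains g = ((pre ++ [f]).count g != 0) := by
        intro v g
        rw [PySem.Dict.contains_insert, hc g, hcnt g]
        by_cases hgf : g = f
        · subst hgf; simp
        · have hfg : ¬ f = g := fun h => hgf h.symm
          simp [hgf, hfg]
      simp only [List.foldl_cons]
      by_cases hmem : pre.count f = 0
      · have hcf : dic.contains f = false := by rw [hc f, hmem]; rfl
        rw [stepA_neg dic res f hcf]
        rw [ih (pre ++ [f]) (res ++ [f]) (dic.insert f 0) fs hfs'
          (hcontains 0)
          (by
            intro g hg0
            by_cases hgf : g = f
            · subst hgf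
              rw [PySem.Dict.getD_insert_self, hcnt g, hmem]
              simp
            · rw [PySem.Dict.getD_insert_of_ne _ _ _ hgf, hcnt g] at *
              have hfg : ¬ f = g := fun h => hgf h.symm
              simp [hfg] at hg0 ⊢
              exact hg g hg0)]
        simp [specGo, htake, hmem, hlen, List.append_assoc]
      · have hcf : dic.contains f = true := by rw [hc f]; simp [hmem]
        have hgf : dic.getD f 0 = (pre.count f : Int) - 1 := hg f hmem
        rw [stepA_pos dic res f hcf, hgf]
        have hval : (pre.count f : Int) - 1 + 1 = (pre.count f : Int) := by ring
        rw [hval]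
        rw [ih (pre ++ [f]) _ (dic.insert f (pre.count f : Int)) fs hfs'
          (hcontains _)
          (by
            intro g hg0
            by_cases hgf2 : g = f
            · subst hgf2
              rw [PySem.Dict.getD_insert_self, hcnt g]
              simp
            · rw [PySem.Dict.getD_insert_of_ne _ _ _ hgf2, hcnt g] at *
              have hfg : ¬ f = g := fun h => hgf2 h.symm
              simp [hfg] at hg0 ⊢
              exact hg g hg0)]
        simp [specGo, htake, hmem, hlen, List.append_assoc]

lemma A_eq_map (fs : List String) :
    unique_files fs = (List.range fs.length).map (pvVal fs) := by
  rw [unique_files_eq_stepA,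
    loopA fs [] [] PySem.Dict.empty fs rfl (by intro f; simp) (by intro f h; simp at h)]
  simp only [List.nil_append, List.length_nil]
  rw [specGo_eq_map fs fs 0 rfl]
  simp

-- ---------- B side: the grouping dict and the two scatter loops ----------

def pvGroups (fs : List String) : PySem.Dict String (List Int) :=
  (PySem.List.enumerate fs 0).foldl
    (fun d p => d.modify p.2 [] (· ++ [p.1])) PySem.Dict.empty

lemma groups_keys (fs : List String) :
    (pvGroups fs).keys = PySem.Set.ofList fs := by
  unfold pvGroups
  rw [PySem.Dict.keys_foldl_modify_key]
  rw [PySem.List.map_snd_enumerate]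
  rw [PySem.Dict.keys_empty, PySem.Set.update_nil_left]

lemma groups_nodup (fs : List String) : (pvGroups fs).keys.Nodup := by
  unfold pvGroups
  exact PySem.Dict.nodup_keys_foldl_modify_key _ _ _ _ _ PySem.Dict.nodup_keys_empty

lemma filter_enum_eq_pvPos (f : String) : ∀ (t : List String) (s : Nat),
    ((((PySem.List.enumerate t (s : Int)).map Prod.swap).filter (fun p => p.1 == f)).map (·.2))
      = (pvPos t s f).map (fun n : Nat => (n : Int)) := by
  intro t
  induction t with
  | nil => intro s; simp [PySem.List.enumerate_nil, pvPos]
  | cons x r ih =>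
      intro s
      have h1 : ((s : Int) + 1) = ((s + 1 : Nat) : Int) := by push_cast; ring
      have htail := ih (s + 1)
      rw [PySem.List.enumerate_cons, h1]
      simp only [List.map_cons, Prod.swap_prod_mk, List.filter_cons, pvPos, List.map_append]
      by_cases hx : x = f
      · have hb : (x == f) = true := by simp [hx]
        rw [hb, hx]
        simp only [if_true, List.map_cons, htail]
        rfl
      · have hb : (x == f) = false := by simp [hx]
        rw [hb, if_neg hx, if_neg (by simp : ¬ (false = true))]
        simpa using htail

lemma groups_getD (fs : List String) (f : String) :
    (pvGroups fs).getD f [] = (pvPos fs 0 f).map (fun n : Nat => (n : Int)) := by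
  unfold pvGroups
  have hfold : (PySem.List.enumerate fs 0).foldl
      (fun (d : PySem.Dict String (List Int)) p => d.modify p.2 [] (· ++ [p.1])) PySem.Dict.empty
      = ((PySem.List.enumerate fs 0).map Prod.swap).foldl
        (fun (d : PySem.Dict String (List Int)) q => d.modify q.1 [] (· ++ [q.2])) PySem.Dict.empty := by
    rw [List.foldl_map]
    rfl
  rw [hfold, PySem.Dict.getD_foldl_modify_append, PySem.Dict.getD_empty]
  have := filter_enum_eq_pvPos f fs 0
  simpa using this

lemma groups_items (fs : List String) :
    (pvGroups fs).items
      = (PySem.Set.ofList fs).map (fun f => (f, (pvPos fs 0 f).map (fun n : Nat => (n : Int)))) := by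
  rw [PySem.Dict.items_eq_map_keys (pvGroups fs) (groups_nodup fs) []]
  rw [groups_keys]
  apply List.map_congr_left
  intro f _
  rw [groups_getD]

def stepB (f : String) (res : List String) (q : Int × Int) : List String :=
  PySem.List.pySetD res q.2 (if q.1 == 0 then f else f ++ PySem.Int.toStr q.1)

lemma inner_scatter (f : String) : ∀ (t : List String) (s k : Nat) (r : List String),
    s + t.length ≤ r.length → ∀ j : Nat,
    ((PySem.List.enumerate ((pvPos t s f).map (fun n : Nat => (n : Int))) (k : Int)).foldl (stepB f) r)[j]?
      = if s ≤ j ∧ j - s < t.length ∧ t.getD (j - s) "" = f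
        then some (pvOut f (k + (t.take (j - s)).count f))
        else r[j]? := by
  intro t
  induction t with
  | nil =>
      intro s k r _ j
      simp [pvPos, PySem.List.enumerate_nil]
  | cons x t ih =>
      intro s k r hlen j
      simp only [List.length_cons] at hlen
      have hk1 : ((k : Int) + 1) = ((k + 1 : Nat) : Int) := by push_cast; ring
      by_cases hx : x = f
      · -- x = f : first element of the group is position s at rank k
        rw [show pvPos (x :: t) s f = s :: pvPos t (s + 1) f by simp [pvPos, hx]]
        rw [List.map_cons, PySem.List.enumerate_cons, List.foldl_cons, hk1]
        rw [show stepB f r ((k : Int), ((s : Nat) : Int)) = r.set s (pvOut f k) by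
          simp [stepB, pvOut]]
        rw [ih (s + 1) (k + 1) (r.set s (pvOut f k)) (by simp; omega) j]
        rcases Nat.lt_trichotomy j s with hj | hj | hj
        · -- j before the group: untouched
          rw [if_neg (by omega), if_neg (by omega)]
          exact List.getElem?_set_ne (by omega)
        · -- j = s : written now, not touched by the tail
          subst hj
          rw [if_neg (by omega)]
          rw [if_pos ⟨le_refl j, by simp, by simp [hx]⟩]
          simp only [Nat.sub_self, List.take_zero, List.count_nil, Nat.add_zero]
          exact List.getElem?_set_self (by omega)
        · -- j after s
          have hd : j - s = (j - (s + 1)) + 1 := by omega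
          by_cases hc : j - (s + 1) < t.length ∧ t.getD (j - (s + 1)) "" = f
          · have hC' : s + 1 ≤ j ∧ j - (s + 1) < t.length ∧ t.getD (j - (s + 1)) "" = f :=
              ⟨by omega, hc.1, hc.2⟩
            have hC : s ≤ j ∧ j - s < (x :: t).length ∧ (x :: t).getD (j - s) "" = f :=
              ⟨by omega, by simp only [List.length_cons]; omega,
               by rw [hd, List.getD_cons_succ]; exact hc.2⟩
            rw [if_pos hC', if_pos hC]
            rw [hd, List.take_succ_cons, List.count_cons]
            simp only [hx, beq_self_eq_true, if_true]
            exact congrArg (fun c => some (pvOut f c)) (by omega)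
          · rw [if_neg (fun h => hc ⟨h.2.1, h.2.2⟩ :
                ¬(s + 1 ≤ j ∧ j - (s + 1) < t.length ∧ t.getD (j - (s + 1)) "" = f))]
            rw [if_neg (by
              intro (h : s ≤ j ∧ j - s < (x :: t).length ∧ (x :: t).getD (j - s) "" = f)
              rw [hd, List.getD_cons_succ] at h
              exact hc ⟨by simp only [List.length_cons] at h; omega, h.2.2⟩)]
            exact List.getElem?_set_ne (by omega)
      · -- x ≠ f : group unchanged, position s never written by this group
        rw [show pvPos (x :: t) s f = pvPos t (s + 1) f by simp [pvPos, hx]]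
        rw [ih (s + 1) k r (by omega) j]
        rcases Nat.lt_trichotomy j s with hj | hj | hj
        · rw [if_neg (by omega), if_neg (by omega)]
        · subst hj
          rw [if_neg (by omega), if_neg (by
            intro h
            exact hx (by simpa using h.2.2))]
        · have hd : j - s = (j - (s + 1)) + 1 := by omega
          by_cases hc : j - (s + 1) < t.length ∧ t.getD (j - (s + 1)) "" = f
          · have hC' : s + 1 ≤ j ∧ j - (s + 1) < t.length ∧ t.getD (j - (s + 1)) "" = f :=
              ⟨by omega, hc.1, hc.2⟩
            have hC : s ≤ j ∧ j - s < (x :: t).length ∧ (x :: t).getD (j - s) "" = f :=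
              ⟨by omega, by simp only [List.length_cons]; omega,
               by rw [hd, List.getD_cons_succ]; exact hc.2⟩
            rw [if_pos hC', if_pos hC]
            rw [hd, List.take_succ_cons, List.count_cons]
            simp [hx]
          · rw [if_neg (fun h => hc ⟨h.2.1, h.2.2⟩ :
                ¬(s + 1 ≤ j ∧ j - (s + 1) < t.length ∧ t.getD (j - (s + 1)) "" = f))]
            rw [if_neg (by
              intro (h : s ≤ j ∧ j - s < (x :: t).length ∧ (x :: t).getD (j - s) "" = f)
              rw [hd, List.getD_cons_succ] at h
              exact hc ⟨by simp only [List.length_cons] at h; omega, h.2.2⟩)]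

lemma len_scatter (f : String) (l : List (Int × Int)) : ∀ (r : List String),
    (l.foldl (stepB f) r).length = r.length := by
  induction l with
  | nil => intro r; rfl
  | cons q l ih =>
      intro r
      rw [List.foldl_cons, ih]
      simp [stepB, PySem.List.length_pySetD]

lemma outer_scatter (fs : List String) : ∀ (ks : List String) (r : List String),
    fs.length ≤ r.length → ∀ j : Nat, j < fs.length →
    (((ks.map (fun f => (f, (pvPos fs 0 f).map (fun n : Nat => (n : Int))))).foldl
       (fun res pr => (PySem.List.enumerate pr.2 0).foldl (stepB pr.1) res) r))[j]?
      = if fs.getD j "" ∈ ks then some (pvVal fs j) else r[j]? := by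
  intro ks
  induction ks with
  | nil => intro r _ j _; simp
  | cons f ks ih =>
      intro r hlen j hj
      rw [List.map_cons, List.foldl_cons]
      rw [show ((f, (pvPos fs 0 f).map (fun n : Nat => (n : Int))) : String × List Int).1 = f from rfl]
      rw [show ((f, (pvPos fs 0 f).map (fun n : Nat => (n : Int))) : String × List Int).2
            = (pvPos fs 0 f).map (fun n : Nat => (n : Int)) from rfl]
      have hinner := inner_scatter f fs 0 0 r (by omega) j
      simp only [Nat.cast_zero, Nat.zero_add, Nat.sub_zero] at hinner
      have hlen' : (((PySem.List.enumerate ((pvPos fs 0 f).map (fun n : Nat => (n : Int))) 0).foldl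
          (stepB f) r)).length = r.length := len_scatter f _ r
      rw [ih _ (by rw [hlen']; exact hlen) j hj]
      by_cases hmem : fs.getD j "" ∈ ks
      · rw [if_pos hmem, if_pos (List.mem_cons_of_mem f hmem)]
      · rw [if_neg hmem]
        rw [hinner]
        by_cases hf : fs.getD j "" = f
        · rw [if_pos ⟨Nat.zero_le j, hj, hf⟩, if_pos (by rw [hf]; exact List.mem_cons_self)]
          simp only [pvVal, pvOut, hf]
        · rw [if_neg (fun h => hf h.2.2), if_neg (by
            intro h
            rcases List.mem_cons.mp h with h1 | h2
            · exact hf h1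
            · exact hmem h2)]

lemma len_outer (items : List (String × List Int)) : ∀ (r : List String),
    ((items.foldl (fun res pr => (PySem.List.enumerate pr.2 0).foldl (stepB pr.1) res) r)).length
      = r.length := by
  induction items with
  | nil => intro r; rfl
  | cons pr items ih =>
      intro r
      rw [List.foldl_cons, ih, len_scatter]

lemma B_eq_map (fs : List String) :
    unique_files_alt fs = (List.range fs.length).map (pvVal fs) := by
  have hB : unique_files_alt fs
      = (pvGroups fs).items.foldl
          (fun res pr => (PySem.List.enumerate pr.2 0).foldl (stepB pr.1) res)
          (List.replicate fs.length "") := rfl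
  rw [hB, groups_items]
  apply List.ext_getElem?
  intro j
  by_cases hj : j < fs.length
  · rw [outer_scatter fs (PySem.Set.ofList fs) _ (by simp) j hj]
    have hmem : fs.getD j "" ∈ PySem.Set.ofList fs := by
      rw [PySem.Set.mem_ofList]
      rw [List.getD_eq_getElem fs "" hj]
      exact List.getElem_mem hj
    rw [if_pos hmem]
    rw [List.getElem?_map, List.getElem?_range hj]
    rfl
  · have h2 : (List.map (pvVal fs) (List.range fs.length))[j]? = none :=
      List.getElem?_eq_none (by simp; omega)
    rw [h2]
    exact List.getElem?_eq_none (by rw [len_outer]; simp; omega)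

-- ===== VERDICT (by name: the statement is the Claim_ definition above) =====
theorem unique_files_spec : Claim_equal_unique_files := by
  intro fs _
  show unique_files fs = unique_files_alt fs
  rw [A_eq_map, B_eq_map]
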